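-- pv_equiv track=rewrite | github.com/vineofmary/prayer | tools/scrape_geez_psalms.py | to_geez
-- ===== SOURCE A (Python) =====
-- def to_geez(n):
--     """Converts an integer to a Ge'ez numeral string."""
--     if n <= 0: return ""
--     geez_map = {
--         1: "፩", 2: "፪", 3: "፫", 4: "፬", 5: "፭",
--         6: "፮", 7: "፯", 8: "፰", 9: "፱", 10: "፲",
--         20: "፳", 30: "፴", 40: "፵", 50: "፶",
--         60: "፷", 70: "፸", 80: "፹", 90: "፺", 100: "፻"
--     }
--     if n in geez_map: return geez_map[n]
--
--     if n > 100:
--         hundreds = n // 100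
--         remainder = n % 100
--         prefix = to_geez(hundreds) if hundreds > 1 else ""
--         return prefix + geez_map[100] + to_geez(remainder)
--     elif n > 10:
--         tens = (n // 10) * 10
--         ones = n % 10
--         return geez_map[tens] + to_geez(ones)
--     return ""
-- ===== SOURCE B (Python) =====
-- def to_geez(n):
--     """Converts an integer to a Ge'ez numeral string (iterative base-100 loop)."""
--     if n <= 0:
--         return ""
--     geez_map = {
--         1: "፩", 2: "፪", 3: "፫", 4: "፬", 5: "፭",
--         6: "፮", 7: "፯", 8: "፰", 9: "፱", 10: "፲",
--         20: "፳", 30: "፴", 40: "፵", 50: "፶",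
--         60: "፷", 70: "፸", 80: "፹", 90: "፺", 100: "፻"
--     }
--     if n in geez_map:
--         return geez_map[n]
--
--     def two(r):
--         # render a value 0 <= r <= 100 (empty for 0)
--         if r == 0:
--             return ""
--         if r in geez_map:
--             return geez_map[r]
--         return geez_map[(r // 10) * 10] + geez_map[r % 10]
--
--     v = n
--     rems = []
--     while v > 100:
--         rems.append(v % 100)
--         v //= 100
--     res = "" if v == 1 else two(v)
--     for r in reversed(rems):
--         res += "፻" + two(r)
--     return res
-- ===== Notes on version B (the rewrite author's own statement) =====
-- stated objective: alternative
-- what changed: Replaces A's three-way self-recursion with a single iterative loop that peels base-100 digits into a list, plus one non-recursive helper rendering any value below 100, then stitches the pieces with one fold.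
import Mathlib
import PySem

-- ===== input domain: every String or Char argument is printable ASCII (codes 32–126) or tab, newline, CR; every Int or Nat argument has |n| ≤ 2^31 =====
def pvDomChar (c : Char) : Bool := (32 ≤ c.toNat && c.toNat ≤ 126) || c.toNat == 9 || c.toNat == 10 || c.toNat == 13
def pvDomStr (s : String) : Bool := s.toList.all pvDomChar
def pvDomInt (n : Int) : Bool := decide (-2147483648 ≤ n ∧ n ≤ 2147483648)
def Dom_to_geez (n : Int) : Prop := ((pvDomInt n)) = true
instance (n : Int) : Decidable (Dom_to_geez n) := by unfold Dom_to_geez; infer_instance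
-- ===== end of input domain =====

-- B replaces A's self-recursion with an iterative base-100 digit loop; objective: alternative decomposition.

-- ===== PORT A =====
def geezMapA : PySem.Dict Int String :=
  PySem.Dict.ofList [(1, "፩"), (2, "፪"), (3, "፫"), (4, "፬"), (5, "፭"),
    (6, "፮"), (7, "፯"), (8, "፰"), (9, "፱"), (10, "፲"),
    (20, "፳"), (30, "፴"), (40, "፵"), (50, "፶"),
    (60, "፷"), (70, "፸"), (80, "፹"), (90, "፺"), (100, "፻")]

def to_geez (n : Int) : String :=
  if n ≤ 0 then "" else
  match geezMapA.get? n with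
  | some s => s
  | none =>
    if _h100 : 100 < n then
      let hundreds := PySem.Int.floordiv n 100
      let remainder := PySem.Int.mod n 100
      let pfx := if 1 < hundreds then to_geez hundreds else ""
      pfx ++ (geezMapA.get? 100).getD "" ++ to_geez remainder
    else if _h10 : 10 < n then
      let tens := (PySem.Int.floordiv n 10) * 10
      let ones := PySem.Int.mod n 10
      (geezMapA.get? tens).getD "" ++ to_geez ones
    else ""
termination_by n.toNat
decreasing_by
  · rw [PySem.Int.floordiv_eq_ediv_of_pos (by omega : (0:Int) < 100)]; omega
  · rw [PySem.Int.mod_eq_emod_of_pos (by omega : (0:Int) < 100)]; omega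
  · rw [PySem.Int.mod_eq_emod_of_pos (by omega : (0:Int) < 10)]; omega

-- ===== PORT B =====
def geezMapB : PySem.Dict Int String :=
  PySem.Dict.ofList [(1, "፩"), (2, "፪"), (3, "፫"), (4, "፬"), (5, "፭"),
    (6, "፮"), (7, "፯"), (8, "፰"), (9, "፱"), (10, "፲"),
    (20, "፳"), (30, "፴"), (40, "፵"), (50, "፶"),
    (60, "፷"), (70, "፸"), (80, "፹"), (90, "፺"), (100, "፻")]

-- helper two(r): renders 0 ≤ r ≤ 100 without recursion
def twoB (r : Int) : String :=
  if r = 0 then "" else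
  match geezMapB.get? r with
  | some s => s
  | none =>
      (geezMapB.get? ((PySem.Int.floordiv r 10) * 10)).getD ""
        ++ (geezMapB.get? (PySem.Int.mod r 10)).getD ""

-- the while loop: peel base-100 remainders into rems
def collectB (v : Int) (rems : List Int) : Int × List Int :=
  if _h : 100 < v then
    collectB (PySem.Int.floordiv v 100) (rems ++ [PySem.Int.mod v 100])
  else (v, rems)
termination_by v.toNat
decreasing_by
  rw [PySem.Int.floordiv_eq_ediv_of_pos (by omega : (0:Int) < 100)]; omega

def to_geez_alt (n : Int) : String :=
  if n ≤ 0 then "" else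
  match geezMapB.get? n with
  | some s => s
  | none =>
    let p := collectB n []
    let res := if p.1 = 1 then "" else twoB p.1
    p.2.reverse.foldl (fun acc r => acc ++ "፻" ++ twoB r) res

-- ===== PRECONDITION & SPEC =====
def Spec_to_geez (n : Int) (out : String) : Prop := out = to_geez_alt n
instance (n : Int) (out : String) : Decidable (Spec_to_geez n out) := by unfold Spec_to_geez; infer_instance

-- ===== CLAIM (what is proved, stated in full; the proofs are below) =====
def Claim_equal_to_geez : Prop := ∀ (n : Int), Dom_to_geez n → Spec_to_geez n (to_geez n)

-- ===== LEMMAS AND PROOFS =====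

lemma geezMapB_eq : geezMapB = geezMapA := rfl

-- keys of the literal map are at most 100
lemma get?_eq_none_of_gt (k : Int) (h : 100 < k) : geezMapA.get? k = none := by
  rw [PySem.Dict.get?_eq_none_iff_not_mem_keys]
  have e : geezMapA.keys = [1,2,3,4,5,6,7,8,9,10,20,30,40,50,60,70,80,90,100] := by decide
  rw [e]; simp; omega

-- a key of [1,100] missing from the map is a non-round two-digit number
set_option maxRecDepth 100000 in
lemma get?_small_none (j : Nat) (h1 : 1 ≤ j) (hj : j ≤ 100)
    (h : geezMapA.get? (j : Int) = none) : 10 < j ∧ j % 10 ≠ 0 := by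
  revert h; revert hj; revert h1; revert j; decide

set_option maxRecDepth 4096 in
lemma get?_digit_isSome (j : Nat) (h1 : 1 ≤ j) (h9 : j ≤ 9) :
    (geezMapA.get? (j : Int)).isSome := by
  revert h9; revert h1; revert j; decide

lemma to_geez_nonpos (n : Int) (h : n ≤ 0) : to_geez n = "" := by
  rw [to_geez]; simp [h]

lemma to_geez_of_get?_some (n : Int) (s : String) (h0 : 0 < n)
    (h : geezMapA.get? n = some s) : to_geez n = s := by
  rw [to_geez]; rw [if_neg (by omega)]; rw [h]

-- unfolding A's recursion in the two-digit branch
lemma to_geez_mid (m : Int) (h10 : 10 < m) (h100 : ¬ 100 < m)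
    (he : geezMapA.get? m = none) :
    to_geez m = (geezMapA.get? ((PySem.Int.floordiv m 10) * 10)).getD ""
      ++ to_geez (PySem.Int.mod m 10) := by
  rw [to_geez, if_neg (by omega), he, dif_neg h100, dif_pos h10]

-- unfolding A's recursion above 100
lemma to_geez_big (m : Int) (h : 100 < m) :
    to_geez m = (if 1 < PySem.Int.floordiv m 100 then to_geez (PySem.Int.floordiv m 100) else "")
      ++ "፻" ++ to_geez (PySem.Int.mod m 100) := by
  rw [to_geez, if_neg (by omega), get?_eq_none_of_gt m h, dif_pos h]
  rfl

-- twoB agrees with A's recursion on 0 ≤ r ≤ 100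
lemma twoB_eq (r : Int) (h0 : 0 ≤ r) (h1 : r ≤ 100) : twoB r = to_geez r := by
  by_cases hz : r = 0
  · subst hz; rw [twoB, to_geez]; simp
  · rw [twoB, if_neg hz, geezMapB_eq]
    cases e : geezMapA.get? r with
    | some s => rw [to_geez_of_get?_some r s (by omega) e]
    | none =>
      have hr : r = ((r.toNat : Nat) : Int) := by omega
      have hsm := get?_small_none r.toNat (by omega) (by omega) (by rw [← hr]; exact e)
      have hones : PySem.Int.mod r 10 = ((r.toNat % 10 : Nat) : Int) := by
        rw [hr]; exact_mod_cast PySem.Int.mod_natCast r.toNat 10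
      have htens : PySem.Int.floordiv r 10 = ((r.toNat / 10 : Nat) : Int) := by
        rw [hr]; exact_mod_cast PySem.Int.floordiv_natCast r.toNat 10
      rw [to_geez_mid r (by omega) (by omega) e, hones, htens]
      have hd := get?_digit_isSome (r.toNat % 10) (by omega) (by omega)
      cases e2 : geezMapA.get? ((r.toNat % 10 : Nat) : Int) with
      | none => rw [e2] at hd; simp at hd
      | some s2 =>
        rw [to_geez_of_get?_some ((r.toNat % 10 : Nat) : Int) s2
          (by exact_mod_cast Nat.pos_of_ne_zero hsm.2) e2]
        rfl

-- accumulator lemma for the loop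
lemma collectB_acc (N : Nat) : ∀ (v : Int), v.toNat ≤ N → ∀ (rs : List Int),
    collectB v rs = ((collectB v []).1, rs ++ (collectB v []).2) := by
  induction N with
  | zero =>
    intro v hv rs
    have hnv : ¬ 100 < v := by omega
    rw [collectB, dif_neg hnv]
    conv_rhs => rw [collectB, dif_neg hnv]
    simp
  | succ N ih =>
    intro v hv rs
    by_cases h : 100 < v
    · have hq : (PySem.Int.floordiv v 100).toNat ≤ N := by
        rw [PySem.Int.floordiv_eq_ediv_of_pos (by omega : (0:Int) < 100)]; omega
      rw [collectB, dif_pos h]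
      conv_rhs => rw [collectB, dif_pos h]
      rw [ih _ hq (rs ++ [PySem.Int.mod v 100]), ih _ hq ([] ++ [PySem.Int.mod v 100])]
      simp
    · rw [collectB, dif_neg h]
      conv_rhs => rw [collectB, dif_neg h]
      simp

-- the loop body of B equals A's recursion, with a leading quotient of 1 suppressed
lemma main_lemma (N : Nat) : ∀ (m : Int), m.toNat ≤ N → 1 ≤ m →
    (collectB m []).2.reverse.foldl (fun acc r => acc ++ "፻" ++ twoB r)
      (if (collectB m []).1 = 1 then "" else twoB (collectB m []).1)
    = if m = 1 then "" else to_geez m := by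
  induction N with
  | zero => intro m hm h1; omega
  | succ N ih =>
    intro m hm h1
    by_cases h : 100 < m
    · -- loop iterates once, recurse on the quotient
      have hq1 : 1 ≤ PySem.Int.floordiv m 100 := by
        rw [PySem.Int.floordiv_eq_ediv_of_pos (by omega : (0:Int) < 100)]; omega
      have hqN : (PySem.Int.floordiv m 100).toNat ≤ N := by
        rw [PySem.Int.floordiv_eq_ediv_of_pos (by omega : (0:Int) < 100)]; omega
      have hstep : collectB m [] =
          ((collectB (PySem.Int.floordiv m 100) []).1,
           [PySem.Int.mod m 100] ++ (collectB (PySem.Int.floordiv m 100) []).2) := by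
        rw [collectB, dif_pos h]
        exact collectB_acc N _ hqN _
      rw [hstep]
      simp only [List.reverse_append, List.reverse_cons, List.reverse_nil, List.nil_append,
        List.foldl_append, List.foldl_cons, List.foldl_nil]
      rw [ih _ hqN hq1]
      rw [if_neg (by omega : ¬ m = 1)]
      rw [to_geez_big m h]
      have hrem : twoB (PySem.Int.mod m 100) = to_geez (PySem.Int.mod m 100) := by
        refine twoB_eq _ (PySem.Int.mod_nonneg m (by omega)) ?_
        have := PySem.Int.mod_lt m (by omega : (0:Int) < 100)
        omega
      rw [hrem]
      by_cases hq : PySem.Int.floordiv m 100 = 1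
      · rw [if_pos hq, if_neg (by omega)]
      · rw [if_neg hq, if_pos (by omega)]
    · -- loop does not run
      have hstop : collectB m [] = (m, []) := by rw [collectB, dif_neg h]
      rw [hstop]
      simp only [List.reverse_nil, List.foldl_nil]
      by_cases h1' : m = 1
      · rw [if_pos h1', if_pos h1']
      · rw [if_neg h1', if_neg h1']
        exact twoB_eq m (by omega) (by omega)

-- ===== VERDICT (by name: the statement is the Claim_ definition above) =====
theorem to_geez_spec : Claim_equal_to_geez := by
  intro n _
  unfold Spec_to_geez
  rw [to_geez_alt]
  by_cases hn : n ≤ 0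
  · rw [if_pos hn, to_geez_nonpos n hn]
  · rw [if_neg hn, geezMapB_eq]
    cases e : geezMapA.get? n with
    | some s => rw [to_geez_of_get?_some n s (by omega) e]
    | none =>
      have hne1 : n ≠ 1 := by
        intro h; subst h; simp [show geezMapA.get? 1 = some "፩" from by decide] at e
      have := main_lemma n.toNat n (le_refl _) (by omega)
      rw [if_neg hne1] at this
      simpa using this.symm
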